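-- pv_equiv track=rewrite | github.com/soupernerd/poly_sniper | app/dashboard/app.py | _default_sim_asset_tf_enabled
-- ===== SOURCE A (Python) =====
-- _SIM_ASSETS = ("bitcoin", "ethereum", "solana", "xrp")
--
-- _SIM_TF_LABEL_TO_SECONDS = {"5m": 300, "15m": 900, "1h": 3600, "4h": 14400, "1d": 86400}
--
-- def _default_sim_asset_tf_enabled(
--     assets: list[str] | None = None,
--     tfs: list[str] | None = None,
-- ) -> dict[str, dict[str, bool]]:
--     active_assets = set(assets or list(_SIM_ASSETS))
--     active_tfs = set(tfs or list(_SIM_TF_LABEL_TO_SECONDS.keys()))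
--     out: dict[str, dict[str, bool]] = {}
--     for asset in _SIM_ASSETS:
--         out[asset] = {}
--         for tf in _SIM_TF_LABEL_TO_SECONDS:
--             out[asset][tf] = (asset in active_assets and tf in active_tfs)
--     return out
-- ===== SOURCE B (Python) =====
-- _SIM_ASSETS = ("bitcoin", "ethereum", "solana", "xrp")
--
-- _SIM_TF_LABEL_TO_SECONDS = {"5m": 300, "15m": 900, "1h": 3600, "4h": 14400, "1d": 86400}
--
--
-- def _default_sim_asset_tf_enabled(
--     assets: list[str] | None = None,
--     tfs: list[str] | None = None,
-- ) -> dict[str, dict[str, bool]]: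
--     # Default-initialize the full grid to False, then scatter True from the inputs.
--     out = {a: {tf: False for tf in _SIM_TF_LABEL_TO_SECONDS} for a in _SIM_ASSETS}
--     tf_hits = [tf for tf in (tfs or list(_SIM_TF_LABEL_TO_SECONDS))
--                if tf in _SIM_TF_LABEL_TO_SECONDS]
--     for a in (assets or list(_SIM_ASSETS)):
--         row = out.get(a)
--         if row is not None:
--             for tf in tf_hits:
--                 row[tf] = True
--     return out
-- ===== Notes on version B (the rewrite author's own statement) =====
-- stated objective: alternative
-- what changed: Instead of testing set membership for every cell of the fixed asset x timeframe grid, B default-initializes the whole grid to False and then scatters True by iterating over the input asset/timeframe lists, updating only the rows and cells they name.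
import Mathlib
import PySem

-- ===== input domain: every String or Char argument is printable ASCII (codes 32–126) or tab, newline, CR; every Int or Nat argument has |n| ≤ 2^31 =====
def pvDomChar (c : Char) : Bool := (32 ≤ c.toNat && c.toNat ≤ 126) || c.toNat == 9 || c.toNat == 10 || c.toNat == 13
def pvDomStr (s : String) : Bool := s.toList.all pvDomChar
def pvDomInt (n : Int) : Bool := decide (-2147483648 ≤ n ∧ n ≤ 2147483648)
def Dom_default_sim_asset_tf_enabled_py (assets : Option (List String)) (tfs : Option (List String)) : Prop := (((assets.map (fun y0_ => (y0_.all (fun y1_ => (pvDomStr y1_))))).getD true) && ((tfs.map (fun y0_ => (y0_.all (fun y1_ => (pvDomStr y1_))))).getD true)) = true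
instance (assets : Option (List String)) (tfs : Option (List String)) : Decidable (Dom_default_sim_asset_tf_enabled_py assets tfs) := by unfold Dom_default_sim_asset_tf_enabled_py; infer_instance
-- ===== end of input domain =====

-- B builds the all-False grid first and then scatters True by iterating over the INPUT lists
-- (objective: alternative decomposition; same output, same cost on this constant-size grid).

-- _SIM_ASSETS
def pvSimAssets : List String := ["bitcoin", "ethereum", "solana", "xrp"]
-- keys of _SIM_TF_LABEL_TO_SECONDS in insertion order
def pvSimTfLabels : List String := ["5m", "15m", "1h", "4h", "1d"]

-- `xs or default` (None or [] falls back to the default list)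
def pvOrDefault (o : Option (List String)) (dflt : List String) : List String :=
  match o with
  | some l => if l.isEmpty then dflt else l
  | none => dflt

-- ===== PORT A =====
def default_sim_asset_tf_enabled_py (assets : Option (List String)) (tfs : Option (List String)) : List (String × List (String × Bool)) :=
  let activeAssets : PySem.Set String := PySem.Set.ofList (pvOrDefault assets pvSimAssets)
  let activeTfs : PySem.Set String := PySem.Set.ofList (pvOrDefault tfs pvSimTfLabels)
  -- out = {}; for asset in _SIM_ASSETS: out[asset] = {}; for tf in …: out[asset][tf] = …
  -- (all keys are distinct literals, so each dict assignment appends a fresh entry)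
  pvSimAssets.foldl (fun out asset =>
    out ++ [(asset,
      pvSimTfLabels.foldl (fun row tf =>
        row ++ [(tf, activeAssets.contains asset && activeTfs.contains tf)]) [])]) []

-- ===== PORT B =====
-- row[tf] = True (update of an existing key)
def pvSetTf (row : List (String × Bool)) (tf : String) : List (String × Bool) :=
  row.map (fun p => if p.1 = tf then (p.1, true) else p)

-- for tf in tf_hits: row[tf] = True
def pvSetRow (row : List (String × Bool)) (hits : List String) : List (String × Bool) :=
  hits.foldl pvSetTf row

def default_sim_asset_tf_enabled_py_alt (assets : Option (List String)) (tfs : Option (List String)) : List (String × List (String × Bool)) :=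
  let grid : List (String × List (String × Bool)) :=
    pvSimAssets.map (fun a => (a, pvSimTfLabels.map (fun tf => (tf, false))))
  let tfHits : List String :=
    (pvOrDefault tfs pvSimTfLabels).filter (fun tf => pvSimTfLabels.contains tf)
  (pvOrDefault assets pvSimAssets).foldl (fun out a =>
    -- row = out.get(a); if row is not None: scatter True into it
    out.map (fun p => if p.1 = a then (p.1, pvSetRow p.2 tfHits) else p)) grid

-- ===== PRECONDITION & SPEC =====
def Spec_default_sim_asset_tf_enabled_py (assets : Option (List String)) (tfs : Option (List String)) (out : List (String × List (String × Bool))) : Prop := out = default_sim_asset_tf_enabled_py_alt assets tfs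
instance (assets : Option (List String)) (tfs : Option (List String)) (out : List (String × List (String × Bool))) : Decidable (Spec_default_sim_asset_tf_enabled_py assets tfs out) := by unfold Spec_default_sim_asset_tf_enabled_py; infer_instance

-- ===== CLAIM (what is proved, stated in full; the proofs are below) =====
def Claim_equal_default_sim_asset_tf_enabled_py : Prop := ∀ (assets : Option (List String)) (tfs : Option (List String)), Dom_default_sim_asset_tf_enabled_py assets tfs → Spec_default_sim_asset_tf_enabled_py assets tfs (default_sim_asset_tf_enabled_py assets tfs)

-- ===== LEMMAS AND PROOFS =====

-- scatter into one row = pointwise or with membership in the hit list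
theorem pvSetRow_eq_map (row : List (String × Bool)) (hits : List String) :
    pvSetRow row hits = row.map (fun p => (p.1, p.2 || hits.contains p.1)) := by
  induction hits generalizing row with
  | nil => simp [pvSetRow]
  | cons t T ih =>
      simp only [pvSetRow, List.foldl_cons] at *
      rw [ih, pvSetTf, List.map_map]
      apply List.map_congr_left
      intro p _
      by_cases h : p.1 = t <;> simp [h]

-- the scatter fold = pointwise update of the rows whose key occurs in the asset list
theorem pvScatter_eq_map (L : List String) (hits : List String)
    (g : List (String × List (String × Bool))) :
    L.foldl (fun out a => out.map (fun p => if p.1 = a then (p.1, pvSetRow p.2 hits) else p)) g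
      = g.map (fun p => (p.1, if L.contains p.1 then pvSetRow p.2 hits else p.2)) := by
  induction L generalizing g with
  | nil => simp
  | cons a L ih =>
      simp only [List.foldl_cons]
      rw [ih, List.map_map]
      apply List.map_congr_left
      intro p _
      have idem : pvSetRow (pvSetRow p.2 hits) hits = pvSetRow p.2 hits := by
        simp [pvSetRow_eq_map, List.map_map]
      by_cases h : p.1 = a
      · simp [h, idem]
      · simp [h]

-- membership in set(xs) (as Python's `in`) = membership in xs
theorem pvSet_contains_ofList (l : List String) (x : String) :
    (PySem.Set.ofList l).contains x = l.contains x := by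
  simp [PySem.Set.mem_ofList]

-- ===== VERDICT (by name: the statement is the Claim_ definition above) =====
theorem default_sim_asset_tf_enabled_py_spec : Claim_equal_default_sim_asset_tf_enabled_py := by
  intro assets tfs _
  unfold Spec_default_sim_asset_tf_enabled_py
  unfold default_sim_asset_tf_enabled_py default_sim_asset_tf_enabled_py_alt
  rw [pvScatter_eq_map]
  simp only [PySem.List.foldl_append_singleton_eq_map, pvSet_contains_ofList,
    List.nil_append, List.map_map]
  apply List.map_congr_left
  intro a _
  simp only [Function.comp_apply]
  refine Prod.ext rfl ?_
  simp only [pvSetRow_eq_map, List.map_map, List.contains_eq_mem]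
  by_cases hm : a ∈ pvOrDefault assets pvSimAssets
  · simp only [hm, decide_true, Bool.true_and, if_true]
    apply List.map_congr_left
    intro tf htf
    simp [List.mem_filter, htf]
  · simp [hm]
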